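-- pv_equiv track=rewrite | github.com/Hishamabboud/Agents2 | scripts/search.py | is_junk_job
-- ===== SOURCE A (Python) =====
-- JUNK_TITLE_FRAGMENTS = [
--     "{{",
--     "are you still with us",
--     "position description",
--     "job description",
--     "primary location",
--     "our company",
--     "description",
--     "loading",
--     "please wait",
-- ]
--
-- def is_junk_job(job: dict) -> bool:
--     """Return True if the scraped job has a placeholder/junk title."""
--     title = (job.get("title") or "").strip().lower()
--     if not title:
--         return True
--     for frag in JUNK_TITLE_FRAGMENTS:
--         if title == frag or title.startswith(frag):
--             return True
--     return False
-- ===== SOURCE B (Python) =====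
-- JUNK_TITLE_FRAGMENTS = [
--     "{{",
--     "are you still with us",
--     "position description",
--     "job description",
--     "primary location",
--     "our company",
--     "description",
--     "loading",
--     "please wait",
-- ]
--
-- # Prefix table: fragments grouped by length, so junk detection is one
-- # set lookup per distinct fragment length instead of a scan over all fragments.
-- _JUNK_BY_LEN = {}
-- for _f in JUNK_TITLE_FRAGMENTS:
--     _JUNK_BY_LEN.setdefault(len(_f), set()).add(_f)
--
-- def is_junk_job(job: dict) -> bool:
--     """Return True if the scraped job has a placeholder/junk title."""
--     title = (job.get("title") or "").strip().lower()
--     if not title: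
--         return True
--     return any(title[:n] in frags for n, frags in _JUNK_BY_LEN.items())
-- ===== Notes on version B (the rewrite author's own statement) =====
-- stated objective: alternative
-- what changed: Replaces the per-fragment startswith loop with a precomputed length-to-fragment-set table: the title is tested by slicing one prefix per distinct fragment length and doing a set-membership lookup, instead of scanning all fragments.
import Mathlib
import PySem

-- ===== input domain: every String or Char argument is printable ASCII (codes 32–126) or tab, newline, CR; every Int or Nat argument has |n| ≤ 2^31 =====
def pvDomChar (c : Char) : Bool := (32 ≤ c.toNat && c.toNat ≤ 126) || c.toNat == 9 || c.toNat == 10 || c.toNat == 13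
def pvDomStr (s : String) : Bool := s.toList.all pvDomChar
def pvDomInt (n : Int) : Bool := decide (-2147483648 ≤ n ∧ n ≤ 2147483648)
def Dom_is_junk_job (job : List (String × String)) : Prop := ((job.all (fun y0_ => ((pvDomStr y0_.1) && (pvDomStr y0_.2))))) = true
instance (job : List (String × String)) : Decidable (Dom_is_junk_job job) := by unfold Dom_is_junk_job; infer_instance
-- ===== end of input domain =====

-- B replaces A's per-fragment startswith loop by a precomputed length → fragment-set table
-- queried with one prefix slice per distinct length (alternative data structure, same cost class).


-- ===== PORT A =====
def junkTitleFragments : List String :=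
  ["{{", "are you still with us", "position description", "job description",
   "primary location", "our company", "description", "loading", "please wait"]

def is_junk_job (job : List (String × String)) : Bool :=
  let title := PySem.Str.lower (PySem.Str.strip ((job.lookup "title").getD ""))
  if title = "" then true
  else junkTitleFragments.any (fun frag => title == frag || PySem.Str.startswith title frag)

-- ===== PORT B =====
-- module-level table: fragments grouped by length (Source B's _JUNK_BY_LEN)
def junkByLen : PySem.Dict Int (PySem.Set String) :=
  junkTitleFragments.foldl
    (fun d f => PySem.Dict.modify d (PySem.Str.len f) PySem.Set.empty (fun s => PySem.Set.add s f))
    PySem.Dict.empty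

def is_junk_job_alt (job : List (String × String)) : Bool :=
  let title := PySem.Str.lower (PySem.Str.strip ((job.lookup "title").getD ""))
  if title = "" then true
  else (PySem.Dict.items junkByLen).any
    (fun p => PySem.Set.contains p.2 (PySem.Str.slice title none (some p.1)))

-- ===== PRECONDITION & SPEC =====
def Spec_is_junk_job (job : List (String × String)) (out : Bool) : Prop := out = is_junk_job_alt job
instance (job : List (String × String)) (out : Bool) : Decidable (Spec_is_junk_job job out) := by unfold Spec_is_junk_job; infer_instance

-- ===== CLAIM (what is proved, stated in full; the proofs are below) =====
def Claim_equal_is_junk_job : Prop := ∀ (job : List (String × String)), Dom_is_junk_job job → Spec_is_junk_job job (is_junk_job job)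

-- ===== LEMMAS AND PROOFS =====

-- "title == frag or title.startswith(frag)" collapses to startswith
theorem eq_or_startswith (t f : String) :
    (t == f || PySem.Str.startswith t f) = PySem.Str.startswith t f := by
  cases h : t == f with
  | false => simp
  | true =>
    have : t = f := by simpa using h
    subst this
    simp [PySem.Chars.startswith_iff]

-- a length-n prefix slice equals f iff the title starts with f, when n = len(f)
theorem slice_beq_eq_startswith (t f : String) (n : Int) (h : n = PySem.Str.len f) :
    ((PySem.Str.slice t none (some n)) == f) = PySem.Str.startswith t f := by
  subst h
  rw [Bool.eq_iff_iff]
  simp only [beq_iff_eq, ← String.toList_inj, PySem.Str.toList_slice,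
    PySem.Str.startswith_eq, PySem.Chars.startswith_iff,
    PySem.Chars.slice_eq_listSlice]
  have hn : PySem.Str.len f = (f.toList.length : Int) := by
    simp [PySem.Str.len]
  rw [hn, PySem.List.slice_to_natCast]
  constructor
  · intro he; rw [List.prefix_iff_eq_take]; simpa [List.length_take] using he.symm
  · intro hp
    have := List.prefix_iff_eq_take.mp hp
    exact this.symm

-- the module-level table, evaluated
theorem items_junkByLen : PySem.Dict.items junkByLen =
    [((2 : Int), ["{{"]), (21, ["are you still with us"]), (20, ["position description"]),
     (15, ["job description"]), (16, ["primary location"]),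
     (11, ["our company", "description", "please wait"]), (7, ["loading"])] := by
  have l1 : "{{".length = 2 := rfl
  have l2 : "are you still with us".length = 21 := rfl
  have l3 : "position description".length = 20 := rfl
  have l4 : "job description".length = 15 := rfl
  have l5 : "primary location".length = 16 := rfl
  have l6 : "our company".length = 11 := rfl
  have l7 : "description".length = 11 := rfl
  have l8 : "loading".length = 7 := rfl
  have l9 : "please wait".length = 11 := rfl
  simp [junkByLen, junkTitleFragments, PySem.Dict.modify,
    PySem.Dict.get?, PySem.Dict.insert, PySem.Dict.empty, PySem.Set.add,
    PySem.Set.empty, PySem.Str.len, PySem.Set.contains, PySem.Dict.getD,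
    PySem.Dict.contains, l1, l2, l3, l4, l5, l6, l7, l8, l9]

-- A's fragment loop and B's table lookup agree on every title
theorem loops_eq (t : String) :
    junkTitleFragments.any (fun frag => t == frag || PySem.Str.startswith t frag)
      = (PySem.Dict.items junkByLen).any
          (fun p => PySem.Set.contains p.2 (PySem.Str.slice t none (some p.1))) := by
  rw [items_junkByLen]
  simp only [junkTitleFragments, List.any_cons, List.any_nil,
    eq_or_startswith, PySem.Set.contains_eq_listContains, List.contains_cons,
    List.contains_nil,
    slice_beq_eq_startswith t "{{" 2 (by rfl),
    slice_beq_eq_startswith t "are you still with us" 21 (by rfl),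
    slice_beq_eq_startswith t "position description" 20 (by rfl),
    slice_beq_eq_startswith t "job description" 15 (by rfl),
    slice_beq_eq_startswith t "primary location" 16 (by rfl),
    slice_beq_eq_startswith t "our company" 11 (by rfl),
    slice_beq_eq_startswith t "description" 11 (by rfl),
    slice_beq_eq_startswith t "please wait" 11 (by rfl),
    slice_beq_eq_startswith t "loading" 7 (by rfl)]
  simp only [Bool.or_false, Bool.or_assoc]
  cases PySem.Str.startswith t "loading" <;> simp

-- ===== VERDICT (by name: the statement is the Claim_ definition above) =====
theorem is_junk_job_spec : Claim_equal_is_junk_job := by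
  intro job _
  unfold Spec_is_junk_job is_junk_job is_junk_job_alt
  set t := PySem.Str.lower (PySem.Str.strip ((job.lookup "title").getD "")) with ht
  by_cases h : t = ""
  · simp [h]
  · simp only [if_neg h]
    exact loops_eq t
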